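-- pv_equiv track=rewrite | github.com/hikarinessa/advent_2020 | advent_2020_ludwig/AOC20/AOC20_20_imagepuzzle.py | transform_image
-- ===== SOURCE A (Python) =====
-- from copy import deepcopy as deep
--
-- def flip(tile):
--
--     newtile = deep(tile)
--     width = len(tile)
--
--     for line in range(width):
--         for pixel in range(width):
--             newtile[line][pixel] = tile[line][width-1-pixel]
--
--     return newtile
--
-- def rotate(tile, degrees):
--
--     if degrees == 0:
--         return tile
--
--     newtile = deep(tile)
--     width = len(tile)
--
--     turns = degrees // 90
--     for i in range(turns):
--         for line in range(width):
--             for pixel in range(width):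
--                 #if degrees == 90:
--                 newtile[line][pixel] = tile[width-1-pixel][line]
--         tile = deep(newtile)
--
--     return newtile
--
-- def tile_variations(tile): # generates and returns a LIST of all flips and rots of a tile
--     variations = []
--     variations.append(tile)
--     variations.append(rotate(tile, 90))
--     variations.append(rotate(tile, 180))
--     variations.append(rotate(tile, 270))
--     variations.append(flip(tile))
--     variations.append(flip(rotate(tile, 90)))
--     variations.append(flip(rotate(tile, 180)))
--     variations.append(flip(rotate(tile, 270)))
--     return variations
--
-- def transform_image(image):
--     image_as_list = [[c for c in s] for s in image.split("\n")]
--     #ppp(image_list)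
--     transformed_images = tile_variations(image_as_list)
--     #ppp(transformed_images)
--     str_image_list = []
--
--     for image in transformed_images:
--
--         str_image = ""
--         for row in image:
--             str_image += "".join(row) + "\n"
--
--         str_image_list.append(str_image[:-1])
--
--     return(str_image_list)
-- ===== SOURCE B (Python) =====
-- def transform_image(image):
--     rows = image.split("\n")
--     w = len(rows)
--     symmetries = [  # the eight symmetries of the square tile, as (i, j) -> source cell
--         lambda i, j: (i, j),                  # identity
--         lambda i, j: (w - 1 - j, i),          # rotate 90 clockwise
--         lambda i, j: (w - 1 - i, w - 1 - j),  # rotate 180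
--         lambda i, j: (j, w - 1 - i),          # rotate 270 clockwise
--         lambda i, j: (i, w - 1 - j),          # horizontal mirror
--         lambda i, j: (j, i),                  # transpose
--         lambda i, j: (w - 1 - i, j),          # vertical mirror
--         lambda i, j: (w - 1 - j, w - 1 - i),  # anti-transpose
--     ]
--     result = []
--     for sym in symmetries:
--         grid = [list(r) for r in rows]
--         for i in range(w):
--             for j in range(w):
--                 si, sj = sym(i, j)
--                 grid[i][j] = rows[si][sj]
--         result.append("\n".join("".join(r) for r in grid))
--     return result
-- ===== Notes on version B (the rewrite author's own statement) =====
-- stated objective: simpler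
-- what changed: Replaces A's flip/rotate pair (rotation by repeated one-turn passes over deep copies, 180/270 needing two and three full passes, flips as an extra pass) with a closed-form table of the eight dihedral symmetries of the square tile, each stamped onto the grid in a single pass via its (i, j) -> source-cell coordinate map.
import Mathlib
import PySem

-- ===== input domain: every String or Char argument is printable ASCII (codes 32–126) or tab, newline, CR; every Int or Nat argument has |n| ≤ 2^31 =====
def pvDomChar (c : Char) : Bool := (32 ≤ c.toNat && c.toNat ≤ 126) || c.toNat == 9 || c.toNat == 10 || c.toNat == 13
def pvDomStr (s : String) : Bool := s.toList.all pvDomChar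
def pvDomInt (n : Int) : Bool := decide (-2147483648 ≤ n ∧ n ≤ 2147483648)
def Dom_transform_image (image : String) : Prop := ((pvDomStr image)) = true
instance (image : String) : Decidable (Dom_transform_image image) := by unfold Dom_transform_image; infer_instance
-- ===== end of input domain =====

-- B replaces A's repeated one-turn rotations and separate flip passes with a closed-form
-- table of the eight square-tile symmetries, each stamped in a single pass (objective: simpler).

-- ===== PORT A =====
def pvFlipA (tile : List (List Char)) : List (List Char) :=
  let width : Int := (tile.length : Int)
  (PySem.List.pyRange 0 width 1).foldl (fun newtile line =>
    (PySem.List.pyRange 0 width 1).foldl (fun nt pixel =>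
      PySem.List.pySetD nt line
        (PySem.List.pySetD (PySem.List.pyGetD nt line []) pixel
          (PySem.List.pyGetD (PySem.List.pyGetD tile line []) (width - 1 - pixel) ' '))) newtile) tile

def pvRotateA (tile : List (List Char)) (degrees : Int) : List (List Char) :=
  if degrees = 0 then tile
  else
    let width : Int := (tile.length : Int)
    let turns : Int := PySem.Int.floordiv degrees 90
    let st := (PySem.List.pyRange 0 turns 1).foldl
      (fun (st : List (List Char) × List (List Char)) _ =>
        let newtile := (PySem.List.pyRange 0 width 1).foldl (fun newtile line =>
          (PySem.List.pyRange 0 width 1).foldl (fun nt pixel =>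
            PySem.List.pySetD nt line
              (PySem.List.pySetD (PySem.List.pyGetD nt line []) pixel
                (PySem.List.pyGetD (PySem.List.pyGetD st.1 (width - 1 - pixel) []) line ' '))) newtile) st.2
        (newtile, newtile)) (tile, tile)
    st.2

def pvTileVariationsA (tile : List (List Char)) : List (List (List Char)) :=
  [tile, pvRotateA tile 90, pvRotateA tile 180, pvRotateA tile 270,
   pvFlipA tile, pvFlipA (pvRotateA tile 90), pvFlipA (pvRotateA tile 180), pvFlipA (pvRotateA tile 270)]

def transform_image (image : String) : List String :=
  let image_as_list := PySem.Chars.splitOn image.toList ['\n']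
  let transformed := pvTileVariationsA image_as_list
  transformed.map (fun img =>
    let str_image := img.foldl (fun acc row => acc ++ row ++ ['\n']) []
    String.ofList (PySem.List.slice str_image none (some (-1))))

-- ===== PORT B =====
def pvSymsB (w : Nat) : List (Nat → Nat → Nat × Nat) :=
  [fun i j => (i, j),                          -- identity
   fun i j => (w - 1 - j, i),                  -- rotate 90 clockwise
   fun i j => (w - 1 - i, w - 1 - j),          -- rotate 180
   fun i j => (j, w - 1 - i),                  -- rotate 270 clockwise
   fun i j => (i, w - 1 - j),                  -- horizontal mirror
   fun i j => (j, i),                          -- transpose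
   fun i j => (w - 1 - i, j),                  -- vertical mirror
   fun i j => (w - 1 - j, w - 1 - i)]          -- anti-transpose

def transform_image_alt (image : String) : List String :=
  let rows := PySem.Chars.splitOn image.toList ['\n']
  let w := rows.length
  (pvSymsB w).map (fun sym =>
    let grid := (List.range w).foldl (fun grid i =>
      (List.range w).foldl (fun g j =>
        g.set i ((g.getD i []).set j ((rows.getD (sym i j).1 []).getD (sym i j).2 ' '))) grid) rows
    String.ofList (PySem.Chars.join ['\n'] grid))

-- ===== PRECONDITION & SPEC =====
-- Pre_ excludes exactly the inputs on which A raises IndexError: some split row is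
-- shorter than the number of rows (e.g. the empty string, or "ab\ncd\nef").
def Pre_transform_image (image : String) : Prop :=
  ∀ r ∈ PySem.Chars.splitOn image.toList ['\n'],
    (PySem.Chars.splitOn image.toList ['\n']).length ≤ r.length
instance (image : String) : Decidable (Pre_transform_image image) := by unfold Pre_transform_image; infer_instance
def pvWitness_transform_image : String := "ab\ncd"

def Spec_transform_image (image : String) (out : List String) : Prop := out = transform_image_alt image
instance (image : String) (out : List String) : Decidable (Spec_transform_image image out) := by unfold Spec_transform_image; infer_instance

-- ===== CLAIM (what is proved, stated in full; the proofs are below) =====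
def Claim_equal_transform_image : Prop := ∀ (image : String), Dom_transform_image image → Pre_transform_image image → Spec_transform_image image (transform_image image)

-- ===== LEMMAS AND PROOFS =====

-- proof-side abbreviations for A's loops
def pvStepFrom (w : Nat) (src X : List (List Char)) : List (List Char) :=
  (List.range w).foldl (fun nt line =>
    (List.range w).foldl (fun nt p =>
      nt.set line ((nt.getD line []).set p ((src.getD (w - 1 - p) []).getD line ' '))) nt) X

def pvStep (w : Nat) (X : List (List Char)) : List (List Char) := pvStepFrom w X X

def pvFlipN (w : Nat) (X : List (List Char)) : List (List Char) :=
  (List.range w).foldl (fun nt line =>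
    (List.range w).foldl (fun nt p =>
      nt.set line ((nt.getD line []).set p ((X.getD line []).getD (w - 1 - p) ' '))) nt) X

-- the common normal form: a symmetry of the w×w tile stamped over rows (tails untouched)
def pvTile (rows : List (List Char)) (p : Nat × Nat) : Char := (rows.getD p.1 []).getD p.2 ' '

def pvNF (rows : List (List Char)) (w : Nat) (f : Nat → Nat → Nat × Nat) : List (List Char) :=
  (List.range w).map (fun i =>
    (List.range w).map (fun j => pvTile rows (f i j)) ++ (rows.getD i []).drop w)

-- filling the first n slots of a list by an index loop of set's
lemma pvFillSet {α : Type} (d : α) (g : Nat → α → α) :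
    ∀ (n : Nat) (xs : List α), n ≤ xs.length →
    (List.range n).foldl (fun acc i => acc.set i (g i (acc.getD i d))) xs
      = (List.range n).map (fun i => g i (xs.getD i d)) ++ xs.drop n := by
  intro n
  induction n with
  | zero => intro xs h; simp
  | succ n ih =>
    intro xs h
    have hn : n < xs.length := by omega
    rw [List.range_succ, List.foldl_append, ih xs (by omega), List.foldl_cons, List.foldl_nil]
    have hlen : ((List.range n).map (fun i => g i (xs.getD i d))).length = n := by simp
    have hgd : ((List.range n).map (fun i => g i (xs.getD i d)) ++ xs.drop n).getD n d
        = xs.getD n d := by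
      rw [List.getD_append_right _ _ _ _ (by omega), hlen, Nat.sub_self,
        List.drop_eq_getElem_cons hn]
      rw [List.getD_eq_getElem xs d hn]
      rfl
    rw [hgd, List.set_append, if_neg (by omega), hlen, Nat.sub_self,
      List.drop_eq_getElem_cons hn, List.set_cons_zero]
    simp [List.map_append]

-- the inner pixel loop only touches row `line`
lemma pvLoc {α : Type} (line : Nat) (f : Nat → α) (L : List Nat) :
    ∀ (nt : List (List α)),
    L.foldl (fun nt p => nt.set line ((nt.getD line []).set p (f p))) nt
      = nt.set line (L.foldl (fun r p => r.set p (f p)) (nt.getD line [])) := by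
  induction L with
  | nil =>
    intro nt
    simp only [List.foldl_nil]
    by_cases hl : line < nt.length
    · symm
      apply List.ext_getElem
      · simp
      · intro i h1 h2
        rw [List.getElem_set]
        split
        · next heq => subst heq; rw [List.getD_eq_getElem nt [] (by simpa using hl)]
        · rfl
    · symm
      rw [List.set_eq_of_length_le (by omega)]
  | cons a L ih =>
    intro nt
    simp only [List.foldl_cons]
    rw [ih, List.set_set]
    by_cases hl : line < nt.length
    · rw [List.getD_eq_getElem _ [] (by simpa using hl), List.getElem_set, if_pos rfl]
    · have hle : nt.length ≤ line := Nat.le_of_not_lt hl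
      simp [List.set_eq_of_length_le hle]

-- characterization of the double write loop
lemma pvMaster (v : Nat → Nat → Char) (w : Nat) (X : List (List Char))
    (hw : X.length = w) (h : ∀ r ∈ X, w ≤ r.length) :
    (List.range w).foldl (fun nt line =>
      (List.range w).foldl (fun nt p =>
        nt.set line ((nt.getD line []).set p (v line p))) nt) X
      = (List.range w).map (fun i => (List.range w).map (v i) ++ (X.getD i []).drop w) := by
  have hg : (List.range w).foldl (fun nt line =>
        (List.range w).foldl (fun nt p =>
          nt.set line ((nt.getD line []).set p (v line p))) nt) X
      = (List.range w).foldl (fun nt line =>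
          nt.set line ((List.range w).foldl (fun r p => r.set p (v line p)) (nt.getD line []))) X := by
    apply PySem.List.foldl_congr_mem
    intro nt line _
    exact pvLoc line (fun p => v line p) (List.range w) nt
  rw [hg]
  have h2 : (List.range w).foldl (fun nt line =>
        nt.set line ((List.range w).foldl (fun r p => r.set p (v line p)) (nt.getD line []))) X
      = (List.range w).map (fun i =>
          (List.range w).foldl (fun r p => r.set p (v i p)) (X.getD i [])) ++ X.drop w :=
    pvFillSet [] (fun line row => (List.range w).foldl (fun r p => r.set p (v line p)) row) w X (by omega)
  rw [h2, show X.drop w = [] from by rw [← hw]; exact List.drop_length, List.append_nil]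
  apply List.map_congr_left
  intro i hi
  have hi' : i < w := List.mem_range.mp hi
  have hmem : X.getD i [] ∈ X := by
    rw [List.getD_eq_getElem X [] (by omega)]
    exact List.getElem_mem _
  have hrow : w ≤ (X.getD i []).length := h _ hmem
  exact pvFillSet ' ' (fun p _ => v i p) w (X.getD i []) hrow

-- Int-indexed port loops reduce to the Nat-indexed forms
lemma pvFlipA_eq (X : List (List Char)) : pvFlipA X = pvFlipN X.length X := by
  unfold pvFlipA pvFlipN
  simp only [PySem.List.pyRange_zero_natCast, List.foldl_map]
  apply PySem.List.foldl_congr_mem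
  intro nt line _
  apply PySem.List.foldl_congr_mem
  intro acc p hp
  have hp' : p < X.length := List.mem_range.mp hp
  have hc : ((X.length : Int) - 1 - (p : Int)) = ((X.length - 1 - p : Nat) : Int) := by omega
  rw [hc]
  simp only [PySem.List.pySetD_natCast, PySem.List.pyGetD_natCast]

lemma pvLoop_eq (w : Nat) (src X : List (List Char)) :
    (PySem.List.pyRange 0 (w : Int) 1).foldl (fun newtile line =>
      (PySem.List.pyRange 0 (w : Int) 1).foldl (fun nt pixel =>
        PySem.List.pySetD nt line
          (PySem.List.pySetD (PySem.List.pyGetD nt line []) pixel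
            (PySem.List.pyGetD (PySem.List.pyGetD src ((w : Int) - 1 - pixel) []) line ' '))) newtile) X
    = pvStepFrom w src X := by
  unfold pvStepFrom
  simp only [PySem.List.pyRange_zero_natCast, List.foldl_map]
  apply PySem.List.foldl_congr_mem
  intro nt line _
  apply PySem.List.foldl_congr_mem
  intro acc p hp
  have hp' : p < w := List.mem_range.mp hp
  have hc : ((w : Int) - 1 - (p : Int)) = ((w - 1 - p : Nat) : Int) := by omega
  rw [hc]
  simp only [PySem.List.pySetD_natCast, PySem.List.pyGetD_natCast]

lemma pvRotateA_90 (X : List (List Char)) : pvRotateA X 90 = pvStep X.length X := by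
  unfold pvRotateA
  rw [if_neg (by decide : ¬ ((90:Int) = 0))]
  simp only [show PySem.Int.floordiv 90 90 = 1 from by decide,
    show PySem.List.pyRange 0 1 1 = [(0:Int)] from by decide,
    List.foldl_cons, List.foldl_nil]
  rw [pvLoop_eq X.length X X]
  rfl

lemma pvRotateA_180 (X : List (List Char)) :
    pvRotateA X 180 = pvStep X.length (pvStep X.length X) := by
  unfold pvRotateA
  rw [if_neg (by decide : ¬ ((180:Int) = 0))]
  simp only [show PySem.Int.floordiv 180 90 = 2 from by decide,
    show PySem.List.pyRange 0 2 1 = [(0:Int), 1] from by decide,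
    List.foldl_cons, List.foldl_nil]
  rw [pvLoop_eq X.length X X,
    pvLoop_eq X.length (pvStepFrom X.length X X) (pvStepFrom X.length X X)]
  rfl

lemma pvRotateA_270 (X : List (List Char)) :
    pvRotateA X 270 = pvStep X.length (pvStep X.length (pvStep X.length X)) := by
  unfold pvRotateA
  rw [if_neg (by decide : ¬ ((270:Int) = 0))]
  simp only [show PySem.Int.floordiv 270 90 = 3 from by decide,
    show PySem.List.pyRange 0 3 1 = [(0:Int), 1, 2] from by decide,
    List.foldl_cons, List.foldl_nil]
  rw [pvLoop_eq X.length X X,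
    pvLoop_eq X.length (pvStepFrom X.length X X) (pvStepFrom X.length X X),
    pvLoop_eq X.length (pvStepFrom X.length (pvStepFrom X.length X X) (pvStepFrom X.length X X))
      (pvStepFrom X.length (pvStepFrom X.length X X) (pvStepFrom X.length X X))]
  rfl

-- shape facts about the normal form
lemma pvNF_length (rows : List (List Char)) (w : Nat) (f : Nat → Nat → Nat × Nat) :
    (pvNF rows w f).length = w := by simp [pvNF]

lemma pvNF_getD (rows : List (List Char)) (w : Nat) (f : Nat → Nat → Nat × Nat)
    (i : Nat) (hi : i < w) :
    (pvNF rows w f).getD i []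
      = (List.range w).map (fun j => pvTile rows (f i j)) ++ (rows.getD i []).drop w := by
  unfold pvNF
  rw [List.getD_eq_getElem _ [] (by simpa using hi)]
  simp

lemma pvNF_rows_ge (rows : List (List Char)) (w : Nat) (f : Nat → Nat → Nat × Nat) :
    ∀ r ∈ pvNF rows w f, w ≤ r.length := by
  intro r hr
  unfold pvNF at hr
  obtain ⟨i, _, rfl⟩ := List.mem_map.mp hr
  simp

lemma pvNF_entry (rows : List (List Char)) (w : Nat) (f : Nat → Nat → Nat × Nat)
    (i j : Nat) (hi : i < w) (hj : j < w) :
    ((pvNF rows w f).getD i []).getD j ' ' = pvTile rows (f i j) := by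
  rw [pvNF_getD rows w f i hi, List.getD_append _ _ _ _ (by simpa using hj)]
  rw [List.getD_eq_getElem _ ' ' (by simpa using hj)]
  simp

lemma pvNF_tail (rows : List (List Char)) (w : Nat) (f : Nat → Nat → Nat × Nat)
    (i : Nat) (hi : i < w) :
    ((pvNF rows w f).getD i []).drop w = (rows.getD i []).drop w := by
  rw [pvNF_getD rows w f i hi]
  rw [List.drop_append_of_le_length (by simp)]
  simp

lemma pvNF_congr (rows : List (List Char)) (w : Nat) (f g : Nat → Nat → Nat × Nat)
    (h : ∀ i < w, ∀ j < w, f i j = g i j) : pvNF rows w f = pvNF rows w g := by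
  unfold pvNF
  apply List.map_congr_left
  intro i hi
  congr 1
  apply List.map_congr_left
  intro j hj
  rw [h i (List.mem_range.mp hi) j (List.mem_range.mp hj)]

-- the first w cells of a long-enough row, read back by index
lemma pvTake (row : List Char) (w : Nat) (h : w ≤ row.length) :
    (List.range w).map (fun j => row.getD j ' ') = row.take w := by
  apply List.ext_getElem
  · simp
    omega
  · intro k h1 h2
    simp only [List.getElem_map, List.getElem_range, List.getElem_take]
    rw [List.getD_eq_getElem row ' ' (by simp at h1; omega)]

lemma pvNF_id (rows : List (List Char)) (w : Nat) (hw : rows.length = w)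
    (hr : ∀ r ∈ rows, w ≤ r.length) : pvNF rows w (fun i j => (i, j)) = rows := by
  unfold pvNF
  apply List.ext_getElem
  · simp [hw]
  · intro i h1 h2
    have hi : i < w := by simpa using h1
    simp only [List.getElem_map, List.getElem_range, pvTile]
    rw [List.getD_eq_getElem rows [] (by omega)]
    rw [pvTake rows[i] w (hr _ (List.getElem_mem _))]
    exact List.take_append_drop w rows[i]

lemma pvStep_NF (rows : List (List Char)) (w : Nat) (f : Nat → Nat → Nat × Nat) :
    pvStep w (pvNF rows w f) = pvNF rows w (fun i j => f (w - 1 - j) i) := by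
  unfold pvStep pvStepFrom
  rw [pvMaster _ w _ (pvNF_length rows w f) (pvNF_rows_ge rows w f)]
  conv_rhs => unfold pvNF
  apply List.map_congr_left
  intro i hi
  have hi' : i < w := List.mem_range.mp hi
  rw [pvNF_tail rows w f i hi']
  congr 1
  apply List.map_congr_left
  intro j hj
  have hj' : j < w := List.mem_range.mp hj
  exact pvNF_entry rows w f (w - 1 - j) i (by omega) hi'

lemma pvFlipN_NF (rows : List (List Char)) (w : Nat) (f : Nat → Nat → Nat × Nat) :
    pvFlipN w (pvNF rows w f) = pvNF rows w (fun i j => f i (w - 1 - j)) := by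
  unfold pvFlipN
  rw [pvMaster _ w _ (pvNF_length rows w f) (pvNF_rows_ge rows w f)]
  conv_rhs => unfold pvNF
  apply List.map_congr_left
  intro i hi
  have hi' : i < w := List.mem_range.mp hi
  rw [pvNF_tail rows w f i hi']
  congr 1
  apply List.map_congr_left
  intro j hj
  have hj' : j < w := List.mem_range.mp hj
  exact pvNF_entry rows w f i (w - 1 - j) hi' (by omega)

-- A's string assembly equals '\n'.join
lemma pvFoldlAppend (a : List Char) (pieces : List (List Char)) :
    pieces.foldl (fun acc row => acc ++ row ++ ['\n']) a
      = a ++ (pieces.map (fun r => r ++ ['\n'])).flatten := by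
  induction pieces generalizing a with
  | nil => simp
  | cons p rest ih => simp [List.append_assoc]

lemma pvAssemble (pieces : List (List Char)) :
    PySem.List.slice (pieces.foldl (fun acc row => acc ++ row ++ ['\n']) []) none (some (-1))
      = PySem.Chars.join ['\n'] pieces := by
  rw [PySem.List.slice_to_neg_one, pvFoldlAppend, List.nil_append]
  induction pieces with
  | nil => simp [PySem.Chars.join_nil]
  | cons p rest ih =>
    cases rest with
    | nil => simp [PySem.Chars.join_singleton]
    | cons q rest' =>
      rw [PySem.Chars.join_cons_cons, ← ih]
      simp only [List.map_cons, List.flatten_cons]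
      rw [List.dropLast_append_of_ne_nil (by simp)]

-- ===== VERDICT (by name: the statement is the Claim_ definition above) =====
theorem transform_image_spec : Claim_equal_transform_image := by
  intro image _ hpre
  unfold Pre_transform_image at hpre
  unfold Spec_transform_image
  simp only [transform_image, transform_image_alt, pvTileVariationsA, pvSymsB]
  generalize hR : PySem.Chars.splitOn image.toList ['\n'] = rows at hpre ⊢
  set w := rows.length with hw
  have hwr : rows.length = w := rfl
  have hr : ∀ r ∈ rows, w ≤ r.length := hpre
  have hid : rows = pvNF rows w (fun i j => (i, j)) := (pvNF_id rows w hwr hr).symm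
  -- A's variants in normal form
  have g1 : pvRotateA rows 90 = pvNF rows w (fun i j => (w - 1 - j, i)) := by
    rw [pvRotateA_90, ← hw]
    conv_lhs => rw [hid]
    rw [pvStep_NF]
  have g2 : pvRotateA rows 180 = pvNF rows w (fun i j => (w - 1 - i, w - 1 - j)) := by
    rw [pvRotateA_180, ← hw]
    conv_lhs => rw [hid]
    rw [pvStep_NF, pvStep_NF]
  have g3 : pvRotateA rows 270 = pvNF rows w (fun i j => (j, w - 1 - i)) := by
    rw [pvRotateA_270, ← hw]
    conv_lhs => rw [hid]
    rw [pvStep_NF, pvStep_NF, pvStep_NF]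
    exact pvNF_congr rows w _ _ (by intro i hi j hj; simp only [Prod.mk.injEq, hw, and_true] at hi hj ⊢; omega)
  have hflip : ∀ f : Nat → Nat → Nat × Nat,
      pvFlipA (pvNF rows w f) = pvNF rows w (fun i j => f i (w - 1 - j)) := by
    intro f
    rw [pvFlipA_eq, pvNF_length, pvFlipN_NF]
  have f0 : pvFlipA rows = pvNF rows w (fun i j => (i, w - 1 - j)) := by
    conv_lhs => rw [hid]
    rw [hflip]
  have f1 : pvFlipA (pvRotateA rows 90) = pvNF rows w (fun i j => (j, i)) := by
    rw [g1, hflip]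
    exact pvNF_congr rows w _ _ (by intro i hi j hj; simp only [Prod.mk.injEq, hw, and_true] at hi hj ⊢; omega)
  have f2 : pvFlipA (pvRotateA rows 180) = pvNF rows w (fun i j => (w - 1 - i, j)) := by
    rw [g2, hflip]
    exact pvNF_congr rows w _ _ (by intro i hi j hj; simp only [Prod.mk.injEq, hw, true_and] at hi hj ⊢; omega)
  have f3 : pvFlipA (pvRotateA rows 270) = pvNF rows w (fun i j => (w - 1 - j, w - 1 - i)) := by
    rw [g3, hflip]
  -- B's grids in normal form
  have hB : ∀ sym : Nat → Nat → Nat × Nat,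
      (List.range w).foldl (fun grid i =>
        (List.range w).foldl (fun g j =>
          g.set i ((g.getD i []).set j ((rows.getD (sym i j).1 []).getD (sym i j).2 ' '))) grid) rows
      = pvNF rows w sym := by
    intro sym
    rw [pvMaster (fun i j => (rows.getD (sym i j).1 []).getD (sym i j).2 ' ') w rows hwr hr]
    rfl
  have hB1 := hB (fun i j => (i, j))
  have hB2 := hB (fun i j => (w - 1 - j, i))
  have hB3 := hB (fun i j => (w - 1 - i, w - 1 - j))
  have hB4 := hB (fun i j => (j, w - 1 - i))
  have hB5 := hB (fun i j => (i, w - 1 - j))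
  have hB6 := hB (fun i j => (j, i))
  have hB7 := hB (fun i j => (w - 1 - i, j))
  have hB8 := hB (fun i j => (w - 1 - j, w - 1 - i))
  simp only at hB1 hB2 hB3 hB4 hB5 hB6 hB7 hB8
  simp only [List.map_cons, List.map_nil]
  rw [f0, f1, f2, f3, g1, g2, g3, hB1, hB2, hB3, hB4, hB5, hB6, hB7, hB8]
  simp only [pvAssemble]
  rw [← hid]
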